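-- pv_equiv track=rewrite | github.com/AntoineToullalan/Projet_Optimisation_MultiGraphes_TOULLALAN_YAKHOU | grapheChemins.py | departArrivee
-- ===== SOURCE A (Python) =====
-- INF=10**6
--
-- def departArrivee(sommets,x,y):
--     depart=(x,INF)
--     arrivee=(y,0)
--     for s in sommets:
--         u,t=s
--         if(u==y and t>arrivee[1]):
--             arrivee=s
--         if(u==x and t<depart[1]):
--             depart=s
--     return (depart,arrivee)
-- ===== SOURCE B (Python) =====
-- INF = 10**6
--
-- def departArrivee(sommets, x, y):
--     asc = sorted(sommets, key=lambda s: s[1])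
--     desc = sorted(sommets, key=lambda s: s[1], reverse=True)
--     depart = next((s for s in asc if s[0] == x and s[1] < INF), (x, INF))
--     arrivee = next((s for s in desc if s[0] == y and s[1] > 0), (y, 0))
--     return (depart, arrivee)
-- ===== Notes on version B (the rewrite author's own statement) =====
-- stated objective: alternative
-- what changed: Replaced A's single running-comparison loop by a sort-then-first-match algorithm: stable-sort the vertices by time ascending and descending, and take the first admissible x-entry (t<INF) resp. y-entry (t>0), defaulting to the sentinels.
import Mathlib
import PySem

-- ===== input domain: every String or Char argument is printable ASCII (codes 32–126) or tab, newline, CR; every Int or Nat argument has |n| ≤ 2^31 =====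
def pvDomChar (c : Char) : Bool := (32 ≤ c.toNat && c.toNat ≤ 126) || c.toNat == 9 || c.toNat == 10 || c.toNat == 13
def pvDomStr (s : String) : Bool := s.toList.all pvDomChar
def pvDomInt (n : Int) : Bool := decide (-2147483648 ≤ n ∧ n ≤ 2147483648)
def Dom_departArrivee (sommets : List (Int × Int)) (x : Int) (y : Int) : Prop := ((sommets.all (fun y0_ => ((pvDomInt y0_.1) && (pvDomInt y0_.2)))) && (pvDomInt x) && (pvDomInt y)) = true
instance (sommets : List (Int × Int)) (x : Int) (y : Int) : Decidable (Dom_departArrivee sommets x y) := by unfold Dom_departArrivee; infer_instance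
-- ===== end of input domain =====

-- B replaces A's single running-comparison loop by a sort-then-first-match algorithm:
-- stable-sort by time and take the first admissible x-entry (ascending) / y-entry
-- (descending); same results, a different (O(n log n) in Python) algorithm, not faster.

-- ===== PORT A =====
-- literal transliteration of A: one fold carrying (depart, arrivee), both updated by strict comparisons
def departArrivee (sommets : List (Int × Int)) (x : Int) (y : Int) : (Int × Int) × (Int × Int) :=
  sommets.foldl (fun (st : (Int × Int) × (Int × Int)) s =>
    let arrivee := if s.1 = y ∧ s.2 > st.2.2 then s else st.2
    let depart := if s.1 = x ∧ s.2 < st.1.2 then s else st.1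
    (depart, arrivee)) ((x, 1000000), (y, 0))

-- ===== PORT B =====
-- literal transliteration of B: stable sort ascending / descending by time, then the
-- first match of the generator's predicate; next's default is the sentinel
def departArrivee_alt (sommets : List (Int × Int)) (x : Int) (y : Int) : (Int × Int) × (Int × Int) :=
  let asc := PySem.List.sorted sommets (fun s => s.2) false
  let desc := PySem.List.sorted sommets (fun s => s.2) true
  let depart := (asc.find? (fun s => s.1 == x && decide (s.2 < 1000000))).getD (x, 1000000)
  let arrivee := (desc.find? (fun s => s.1 == y && decide (s.2 > 0))).getD (y, 0)
  (depart, arrivee)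

-- ===== PRECONDITION & SPEC =====
def Spec_departArrivee (sommets : List (Int × Int)) (x : Int) (y : Int) (out : (Int × Int) × (Int × Int)) : Prop := out = departArrivee_alt sommets x y
instance (sommets : List (Int × Int)) (x : Int) (y : Int) (out : (Int × Int) × (Int × Int)) : Decidable (Spec_departArrivee sommets x y out) := by unfold Spec_departArrivee; infer_instance

-- ===== CLAIM (what is proved, stated in full; the proofs are below) =====
def Claim_equal_departArrivee : Prop := ∀ (sommets : List (Int × Int)) (x : Int) (y : Int), Dom_departArrivee sommets x y → Spec_departArrivee sommets x y (departArrivee sommets x y)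

-- ===== LEMMAS AND PROOFS =====

-- A's pair fold splits into two independent scalar folds
theorem pair_fold_split (x y : Int) (L : List (Int × Int)) (d a : Int × Int) :
    L.foldl (fun (st : (Int × Int) × (Int × Int)) s =>
      let arrivee := if s.1 = y ∧ s.2 > st.2.2 then s else st.2
      let depart := if s.1 = x ∧ s.2 < st.1.2 then s else st.1
      (depart, arrivee)) (d, a)
    = (L.foldl (fun d s => if s.1 = x ∧ s.2 < d.2 then s else d) d,
       L.foldl (fun a s => if s.1 = y ∧ s.2 > a.2 then s else a) a) := by
  induction L generalizing d a with
  | nil => rfl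
  | cons s L ih => simp only [List.foldl_cons]; exact ih _ _

-- first-occurring minimum / maximum of the p-elements of L, as an Option fold
def depFoldO (p : Int × Int → Bool) (L : List (Int × Int)) : Option (Int × Int) :=
  L.foldl (fun acc s => if p s then
      match acc with
      | none => some s
      | some m => if m.2 ≤ s.2 then some m else some s
    else acc) none

def arrFoldO (p : Int × Int → Bool) (L : List (Int × Int)) : Option (Int × Int) :=
  L.foldl (fun acc s => if p s then
      match acc with
      | none => some s
      | some m => if s.2 ≤ m.2 then some m else some s
    else acc) none

theorem depFoldO_append (p : Int × Int → Bool) (a : Int × Int) (L : List (Int × Int)) :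
    depFoldO p (L ++ [a])
    = if p a then
        match depFoldO p L with
        | none => some a
        | some m => if m.2 ≤ a.2 then some m else some a
      else depFoldO p L := by
  unfold depFoldO
  rw [List.foldl_append, List.foldl_cons, List.foldl_nil]

theorem arrFoldO_append (p : Int × Int → Bool) (a : Int × Int) (L : List (Int × Int)) :
    arrFoldO p (L ++ [a])
    = if p a then
        match arrFoldO p L with
        | none => some a
        | some m => if a.2 ≤ m.2 then some m else some a
      else arrFoldO p L := by
  unfold arrFoldO
  rw [List.foldl_append, List.foldl_cons, List.foldl_nil]

-- inserting a non-p element does not change find? p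
theorem find?_insertBy_notp (bf : (Int × Int) → (Int × Int) → Bool) (p : Int × Int → Bool)
    (a : Int × Int) (ha : p a = false) (S : List (Int × Int)) :
    (PySem.List.insertBy bf a S).find? p = S.find? p := by
  induction S with
  | nil => simp [PySem.List.insertBy, List.find?, ha]
  | cons b S' ih =>
    simp only [PySem.List.insertBy]
    split
    · simp [List.find?, ha]
    · cases hb : p b <;> simp [List.find?, hb, ih]

-- inserting a p-element into an ascending list: find? keeps an earlier ≤-element, else a
theorem find?_insertBy_asc (p : Int × Int → Bool) (a : Int × Int) (ha : p a = true)
    (S : List (Int × Int)) (hS : S.Pairwise (fun u v => u.2 ≤ v.2)) :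
    (PySem.List.insertBy (fun u v => decide (u.2 < v.2)) a S).find? p
    = match S.find? p with
      | none => some a
      | some m => if m.2 ≤ a.2 then some m else some a := by
  induction S with
  | nil => simp [PySem.List.insertBy, List.find?, ha]
  | cons b S' ih =>
    rcases List.pairwise_cons.mp hS with ⟨hb_le, hS'⟩
    simp only [PySem.List.insertBy]
    by_cases hab : a.2 < b.2
    · rw [if_pos (by simpa using hab)]
      cases hb : p b
      · simp only [List.find?, ha, hb]
        rcases hm : S'.find? p with _ | m
        · rfl
        · have hmem : m ∈ S' := List.mem_of_find?_eq_some hm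
          have : ¬ m.2 ≤ a.2 := by have := hb_le m hmem; omega
          simp [this]
      · simp only [List.find?, ha, hb]
        have : ¬ b.2 ≤ a.2 := by omega
        simp [this]
    · rw [if_neg (by simpa using hab)]
      cases hb : p b
      · simp only [List.find?, hb]
        exact ih hS'
      · simp only [List.find?, hb]
        have : b.2 ≤ a.2 := by omega
        simp [this]

-- inserting a p-element into a descending list: find? keeps an earlier ≥-element, else a
theorem find?_insertBy_desc (p : Int × Int → Bool) (a : Int × Int) (ha : p a = true)
    (S : List (Int × Int)) (hS : S.Pairwise (fun u v => v.2 ≤ u.2)) :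
    (PySem.List.insertBy (fun u v => decide (v.2 < u.2)) a S).find? p
    = match S.find? p with
      | none => some a
      | some m => if a.2 ≤ m.2 then some m else some a := by
  induction S with
  | nil => simp [PySem.List.insertBy, List.find?, ha]
  | cons b S' ih =>
    rcases List.pairwise_cons.mp hS with ⟨hb_ge, hS'⟩
    simp only [PySem.List.insertBy]
    by_cases hab : b.2 < a.2
    · rw [if_pos (by simpa using hab)]
      cases hb : p b
      · simp only [List.find?, ha, hb]
        rcases hm : S'.find? p with _ | m
        · rfl
        · have hmem : m ∈ S' := List.mem_of_find?_eq_some hm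
          have : ¬ a.2 ≤ m.2 := by have := hb_ge m hmem; omega
          simp [this]
      · simp only [List.find?, ha, hb]
        have : ¬ a.2 ≤ b.2 := by omega
        simp [this]
    · rw [if_neg (by simpa using hab)]
      cases hb : p b
      · simp only [List.find?, hb]
        exact ih hS'
      · simp only [List.find?, hb]
        have : a.2 ≤ b.2 := by omega
        simp [this]

-- find? on the ascending (resp. descending) stable sort is the option fold
theorem find?_sorted_asc (p : Int × Int → Bool) (L : List (Int × Int)) :
    (PySem.List.sorted L (fun s => s.2) false).find? p = depFoldO p L := by
  induction L using List.reverseRecOn with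
  | nil => rfl
  | append_singleton L a ih =>
    have hsort : PySem.List.sorted (L ++ [a]) (fun s : Int × Int => s.2) false
        = PySem.List.insertBy (fun u v => decide (u.2 < v.2)) a
            (PySem.List.sorted L (fun s => s.2) false) := by
      rw [PySem.List.sorted_eq_foldl_insertBy, PySem.List.sorted_eq_foldl_insertBy,
          List.foldl_append, List.foldl_cons, List.foldl_nil]
    rw [hsort, depFoldO_append]
    cases ha : p a
    · rw [find?_insertBy_notp _ p a ha, ih]
      simp
    · rw [find?_insertBy_asc p a ha _ (PySem.List.sorted_pairwise L (fun s => s.2)), ih]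
      simp

theorem find?_sorted_desc (p : Int × Int → Bool) (L : List (Int × Int)) :
    (PySem.List.sorted L (fun s => s.2) true).find? p = arrFoldO p L := by
  induction L using List.reverseRecOn with
  | nil => rfl
  | append_singleton L a ih =>
    have hsort : PySem.List.sorted (L ++ [a]) (fun s : Int × Int => s.2) true
        = PySem.List.insertBy (fun u v => decide (v.2 < u.2)) a
            (PySem.List.sorted L (fun s => s.2) true) := by
      rw [PySem.List.sorted_rev_eq_foldl_insertBy, PySem.List.sorted_rev_eq_foldl_insertBy,
          List.foldl_append, List.foldl_cons, List.foldl_nil]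
    rw [hsort, arrFoldO_append]
    cases ha : p a
    · rw [find?_insertBy_notp _ p a ha, ih]
      simp
    · rw [find?_insertBy_desc p a ha _ (PySem.List.sorted_pairwise_rev L (fun s => s.2)), ih]
      simp

-- the option folds only ever hold p-elements
theorem depFoldO_p (p : Int × Int → Bool) (L : List (Int × Int)) :
    ∀ m, depFoldO p L = some m → p m = true := by
  induction L using List.reverseRecOn with
  | nil => intro m h; simp [depFoldO] at h
  | append_singleton L a ih =>
    intro m h
    rw [depFoldO_append] at h
    cases ha : p a <;> rw [ha] at h
    · simp only [Bool.false_eq_true, if_false] at h; exact ih m h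
    · simp only [if_true] at h
      rcases hF : depFoldO p L with _ | m' <;> rw [hF] at h
      · cases h; exact ha
      · dsimp only at h
        by_cases hle : m'.2 ≤ a.2
        · rw [if_pos hle] at h; cases h; exact ih _ hF
        · rw [if_neg hle] at h; cases h; exact ha

theorem arrFoldO_p (p : Int × Int → Bool) (L : List (Int × Int)) :
    ∀ m, arrFoldO p L = some m → p m = true := by
  induction L using List.reverseRecOn with
  | nil => intro m h; simp [arrFoldO] at h
  | append_singleton L a ih =>
    intro m h
    rw [arrFoldO_append] at h
    cases ha : p a <;> rw [ha] at h
    · simp only [Bool.false_eq_true, if_false] at h; exact ih m h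
    · simp only [if_true] at h
      rcases hF : arrFoldO p L with _ | m' <;> rw [hF] at h
      · cases h; exact ha
      · dsimp only at h
        by_cases hle : a.2 ≤ m'.2
        · rw [if_pos hle] at h; cases h; exact ih _ hF
        · rw [if_neg hle] at h; cases h; exact ha

-- A's scalar folds compute exactly the option folds, with the sentinel as default
theorem dep_fold_eq (x : Int) (L : List (Int × Int)) :
    L.foldl (fun d s => if s.1 = x ∧ s.2 < d.2 then s else d) (x, 1000000)
    = (depFoldO (fun s => s.1 == x && decide (s.2 < 1000000)) L).getD (x, 1000000) := by
  induction L using List.reverseRecOn with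
  | nil => rfl
  | append_singleton L a ih =>
    rw [List.foldl_append, List.foldl_cons, List.foldl_nil, ih, depFoldO_append]
    rcases hF : depFoldO (fun s => s.1 == x && decide (s.2 < 1000000)) L with _ | m
    · by_cases hax : a.1 = x
      · by_cases ht : a.2 < 1000000
        · simp [hax, ht]
        · simp [hax, ht]
      · simp [hax]
    · have hm := depFoldO_p _ L m hF
      obtain ⟨hm1, hm2⟩ : m.1 = x ∧ m.2 < 1000000 := by simpa using hm
      by_cases hax : a.1 = x
      · by_cases hlt : a.2 < m.2
        · have h6 : a.2 < 1000000 := by omega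
          simp [hax, hlt, h6, show ¬ m.2 ≤ a.2 from by omega]
        · by_cases hp : a.2 < 1000000
          · simp [hax, hlt, hp, show m.2 ≤ a.2 from by omega]
          · simp [hax, hlt, hp]
      · simp [hax]

theorem arr_fold_eq (y : Int) (L : List (Int × Int)) :
    L.foldl (fun a s => if s.1 = y ∧ s.2 > a.2 then s else a) (y, 0)
    = (arrFoldO (fun s => s.1 == y && decide (s.2 > 0)) L).getD (y, 0) := by
  induction L using List.reverseRecOn with
  | nil => rfl
  | append_singleton L a ih =>
    rw [List.foldl_append, List.foldl_cons, List.foldl_nil, ih, arrFoldO_append]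
    rcases hF : arrFoldO (fun s => s.1 == y && decide (s.2 > 0)) L with _ | m
    · by_cases hay : a.1 = y
      · by_cases ht : a.2 > 0
        · simp [hay, ht]
        · simp [hay, ht]
      · simp [hay]
    · have hm := arrFoldO_p _ L m hF
      obtain ⟨hm1, hm2⟩ : m.1 = y ∧ m.2 > 0 := by simpa using hm
      by_cases hay : a.1 = y
      · by_cases hgt : a.2 > m.2
        · have h0 : a.2 > 0 := by omega
          simp [hay, hgt, h0, show ¬ a.2 ≤ m.2 from by omega]
        · by_cases hp : a.2 > 0
          · simp [hay, hgt, hp, show a.2 ≤ m.2 from by omega]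
          · simp [hay, hgt, hp]
      · simp [hay]

-- ===== VERDICT (by name: the statement is the Claim_ definition above) =====
theorem departArrivee_spec : Claim_equal_departArrivee := by
  intro sommets x y _
  unfold Spec_departArrivee departArrivee departArrivee_alt
  rw [pair_fold_split, dep_fold_eq, arr_fold_eq, ← find?_sorted_asc, ← find?_sorted_desc]
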